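-- pv_equiv track=rewrite | github.com/Sebelino/pyromhackit | pyromhackit/paletteformatter/paletteformatter.py | enumer
-- ===== SOURCE A (Python) =====
-- def enumer(bytestring, step=1):
--     """ bytes -> [int] where step signifies the number of bytes used to
--     represent each number in the output list """
--     dct = {
--         1: list(bytestring),
--         2: [2**8*bytestring[i]+bytestring[i+1]
--             for i in range(0, len(bytestring)-1, 2)],
--         3: [2**16*bytestring[i]+2**8*bytestring[i+1]+bytestring[i+2]
--             for i in range(0, len(bytestring)-2, 3)]
--     }
--     return dct[step]
-- ===== SOURCE B (Python) =====
-- def enumer(bytestring, step=1):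
--     """ bytes -> [int] where step signifies the number of bytes used to
--     represent each number in the output list """
--     if step < 1:
--         raise ValueError("step must be a positive byte width")
--     out = []
--     for i in range(0, len(bytestring) - step + 1, step):
--         val = 0
--         for j in range(step):
--             val = val * 256 + bytestring[i + j]
--         out.append(val)
--     return out
-- ===== Notes on version B (the rewrite author's own statement) =====
-- stated objective: idiomatic
-- what changed: A eagerly builds a dict of three hardcoded per-width grouping formulas and indexes it; B is one uniform chunking loop that base-256-accumulates each width-step group, computing only the requested grouping.
import Mathlib
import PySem

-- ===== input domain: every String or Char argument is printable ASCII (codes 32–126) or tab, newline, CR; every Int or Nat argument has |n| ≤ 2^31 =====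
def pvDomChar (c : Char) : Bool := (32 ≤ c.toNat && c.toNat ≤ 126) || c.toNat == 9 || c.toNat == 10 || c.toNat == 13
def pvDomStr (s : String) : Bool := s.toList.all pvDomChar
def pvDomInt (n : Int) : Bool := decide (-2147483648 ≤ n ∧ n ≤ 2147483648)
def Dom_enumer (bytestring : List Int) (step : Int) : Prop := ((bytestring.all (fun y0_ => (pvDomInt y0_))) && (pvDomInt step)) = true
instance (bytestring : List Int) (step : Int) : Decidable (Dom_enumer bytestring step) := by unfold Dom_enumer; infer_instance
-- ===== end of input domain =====

-- B replaces A's eagerly-built dict of three hardcoded grouping formulas by one uniform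
-- chunking loop with base-256 accumulation, valid for any positive width (objective: idiomatic).

-- ===== PORT A =====
def enumer (bytestring : List Int) (step : Int) : List Int :=
  let dct : PySem.Dict Int (List Int) :=
    ((PySem.Dict.empty.insert 1 bytestring).insert 2
        ((PySem.List.pyRange 0 ((bytestring.length : Int) - 1) 2).map (fun i =>
          2^8 * PySem.List.pyGetD bytestring i 0 + PySem.List.pyGetD bytestring (i+1) 0))).insert 3
        ((PySem.List.pyRange 0 ((bytestring.length : Int) - 2) 3).map (fun i =>
          2^16 * PySem.List.pyGetD bytestring i 0 + 2^8 * PySem.List.pyGetD bytestring (i+1) 0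
            + PySem.List.pyGetD bytestring (i+2) 0))
  (dct.get? step).getD []   -- dct[step]; the KeyError (get? = none) is excluded by Pre_enumer

-- ===== PORT B =====
def enumer_alt (bytestring : List Int) (step : Int) : List Int :=
  if step < 1 then []   -- Source B raises ValueError here (outside Pre_enumer)
  else
    (PySem.List.pyRange 0 ((bytestring.length : Int) - step + 1) step).foldl
      (fun out i =>
        out ++ [(PySem.List.pyRange 0 step 1).foldl
                  (fun val j => val * 256 + PySem.List.pyGetD bytestring (i + j) 0) 0]) []

-- ===== PRECONDITION & SPEC =====
-- A raises KeyError on any step outside the three dict keys 1, 2, 3.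
def Pre_enumer (bytestring : List Int) (step : Int) : Prop := step = 1 ∨ step = 2 ∨ step = 3
instance (bytestring : List Int) (step : Int) : Decidable (Pre_enumer bytestring step) := by unfold Pre_enumer; infer_instance
def pvWitness_enumer : List Int × Int := ([1, 2, 3, 4, 5], 2)

def Spec_enumer (bytestring : List Int) (step : Int) (out : List Int) : Prop := out = enumer_alt bytestring step
instance (bytestring : List Int) (step : Int) (out : List Int) : Decidable (Spec_enumer bytestring step out) := by unfold Spec_enumer; infer_instance

-- ===== CLAIM (what is proved, stated in full; the proofs are below) =====
def Claim_equal_enumer : Prop := ∀ (bytestring : List Int) (step : Int), Dom_enumer bytestring step → Pre_enumer bytestring step → Spec_enumer bytestring step (enumer bytestring step)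

-- ===== LEMMAS AND PROOFS =====

theorem enumer_eq_one (bs : List Int) : enumer bs 1 = enumer_alt bs 1 := by
  unfold enumer enumer_alt
  have h1 : PySem.List.pyRange 0 1 1 = [0] := by decide
  simp only [pysem, h1]
  rw [show ((bs.length : Int) - 1 + 1) = (bs.length : Int) from by ring]
  simp [List.foldl]
  simpa using (PySem.List.map_pyGetD_pyRange_zero' (xs := bs) (d := 0)).symm

theorem enumer_eq_two (bs : List Int) : enumer bs 2 = enumer_alt bs 2 := by
  unfold enumer enumer_alt
  have h2 : PySem.List.pyRange 0 2 1 = [0, 1] := by decide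
  simp only [pysem, h2]
  norm_num
  rw [show ((bs.length : Int) - 2 + 1) = (bs.length : Int) - 1 from by ring]
  apply List.map_congr_left
  intro i _
  simp
  ring

theorem enumer_eq_three (bs : List Int) : enumer bs 3 = enumer_alt bs 3 := by
  unfold enumer enumer_alt
  have h3 : PySem.List.pyRange 0 3 1 = [0, 1, 2] := by decide
  simp only [pysem, h3]
  norm_num
  rw [show ((bs.length : Int) - 3 + 1) = (bs.length : Int) - 2 from by ring]
  apply List.map_congr_left
  intro i _
  simp
  ring

-- ===== VERDICT (by name: the statement is the Claim_ definition above) =====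
theorem enumer_spec : Claim_equal_enumer := by
  intro bs step _ hpre
  unfold Spec_enumer
  rcases hpre with h | h | h <;> subst h
  · exact enumer_eq_one bs
  · exact enumer_eq_two bs
  · exact enumer_eq_three bs
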